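-- pv_equiv track=rewrite | github.com/dhuston/knowledge_plane_app | backend/app/services/communication_analyzer_service.py | _create_duration_distribution
-- ===== SOURCE A (Python) =====
-- from typing import List, Dict, Any, Optional
--
-- def _create_duration_distribution(durations: List[int]) -> Dict[str, int]:
--     """Create a distribution of meeting durations."""
--     bins = {
--         "0-15 min": 0,
--         "16-30 min": 0,
--         "31-60 min": 0,
--         "61-120 min": 0,
--         "120+ min": 0
--     }
--
--     for duration in durations:
--         if duration <= 15:
--             bins["0-15 min"] += 1
--         elif 16 <= duration <= 30:
--             bins["16-30 min"] += 1
--         elif 31 <= duration <= 60: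
--             bins["31-60 min"] += 1
--         elif 61 <= duration <= 120:
--             bins["61-120 min"] += 1
--         else:
--             bins["120+ min"] += 1
--
--     return bins
-- ===== SOURCE B (Python) =====
-- from typing import List, Dict
--
-- def _create_duration_distribution(durations: List[int]) -> Dict[str, int]:
--     """Create a distribution of meeting durations."""
--     c15 = sum(1 for d in durations if d <= 15)
--     c30 = sum(1 for d in durations if d <= 30)
--     c60 = sum(1 for d in durations if d <= 60)
--     c120 = sum(1 for d in durations if d <= 120)
--     return {
--         "0-15 min": c15,
--         "16-30 min": c30 - c15,
--         "31-60 min": c60 - c30,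
--         "61-120 min": c120 - c60,
--         "120+ min": len(durations) - c120,
--     }
-- ===== Notes on version B (the rewrite author's own statement) =====
-- stated objective: alternative
-- what changed: Instead of a single pass that increments one of five dict bins per element via an if/elif chain, B makes staged whole-list cumulative counts (how many durations are <= 15, 30, 60, 120) and obtains each bin by differencing adjacent cumulative counts.
import Mathlib
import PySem

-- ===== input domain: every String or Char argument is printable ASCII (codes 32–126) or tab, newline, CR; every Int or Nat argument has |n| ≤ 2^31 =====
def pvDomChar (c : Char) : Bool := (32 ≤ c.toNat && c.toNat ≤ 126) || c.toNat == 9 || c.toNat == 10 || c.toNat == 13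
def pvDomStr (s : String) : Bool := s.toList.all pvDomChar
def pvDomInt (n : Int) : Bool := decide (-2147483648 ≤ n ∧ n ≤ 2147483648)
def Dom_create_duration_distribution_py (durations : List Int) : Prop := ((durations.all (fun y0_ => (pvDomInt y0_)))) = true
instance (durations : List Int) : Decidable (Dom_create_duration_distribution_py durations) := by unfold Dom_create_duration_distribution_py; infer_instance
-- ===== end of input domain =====

-- B replaces A's single-pass if/elif bucketing by staged cumulative counts (≤15, ≤30, ≤60, ≤120) differenced into bins (alternative; same cost).

-- ===== PORT A =====
-- the if/elif chain: each branch does bins[k] += 1, i.e. modify k with (+1)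
def create_duration_distribution_py (durations : List Int) : List (String × Int) :=
  (durations.foldl (fun bins duration =>
      if duration ≤ 15 then bins.modify "0-15 min" 0 (· + 1)
      else if 16 ≤ duration ∧ duration ≤ 30 then bins.modify "16-30 min" 0 (· + 1)
      else if 31 ≤ duration ∧ duration ≤ 60 then bins.modify "31-60 min" 0 (· + 1)
      else if 61 ≤ duration ∧ duration ≤ 120 then bins.modify "61-120 min" 0 (· + 1)
      else bins.modify "120+ min" 0 (· + 1))
    (PySem.Dict.ofList [("0-15 min", 0), ("16-30 min", 0), ("31-60 min", 0),
                        ("61-120 min", 0), ("120+ min", 0)])).items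

-- ===== PORT B =====
-- sum(1 for d in durations if d <= t)
def pvCountLE (durations : List Int) (t : Int) : Int :=
  (durations.countP (fun d => d ≤ t) : Int)

def create_duration_distribution_py_alt (durations : List Int) : List (String × Int) :=
  let c15 := pvCountLE durations 15
  let c30 := pvCountLE durations 30
  let c60 := pvCountLE durations 60
  let c120 := pvCountLE durations 120
  [("0-15 min", c15), ("16-30 min", c30 - c15), ("31-60 min", c60 - c30),
   ("61-120 min", c120 - c60), ("120+ min", (durations.length : Int) - c120)]

-- ===== PRECONDITION & SPEC =====
def Spec_create_duration_distribution_py (durations : List Int) (out : List (String × Int)) : Prop := out = create_duration_distribution_py_alt durations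
instance (durations : List Int) (out : List (String × Int)) : Decidable (Spec_create_duration_distribution_py durations out) := by unfold Spec_create_duration_distribution_py; infer_instance

-- ===== CLAIM (what is proved, stated in full; the proofs are below) =====
def Claim_equal_create_duration_distribution_py : Prop := ∀ (durations : List Int), Dom_create_duration_distribution_py durations → Spec_create_duration_distribution_py durations (create_duration_distribution_py durations)

-- ===== LEMMAS AND PROOFS =====

-- A's fold over a 5-key literal dict, characterised with symbolic accumulator values
theorem pv_foldl_char (l : List Int) (a b c d e : Int) :
    (l.foldl (fun bins duration =>
      if duration ≤ 15 then bins.modify "0-15 min" 0 (· + 1)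
      else if 16 ≤ duration ∧ duration ≤ 30 then bins.modify "16-30 min" 0 (· + 1)
      else if 31 ≤ duration ∧ duration ≤ 60 then bins.modify "31-60 min" 0 (· + 1)
      else if 61 ≤ duration ∧ duration ≤ 120 then bins.modify "61-120 min" 0 (· + 1)
      else bins.modify "120+ min" 0 (· + 1))
      (PySem.Dict.mk [("0-15 min", a), ("16-30 min", b), ("31-60 min", c),
                      ("61-120 min", d), ("120+ min", e)]))
    = PySem.Dict.mk
        [("0-15 min", a + (l.countP (fun x => x ≤ 15) : Int)),
         ("16-30 min", b + (l.countP (fun x => 16 ≤ x ∧ x ≤ 30) : Int)),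
         ("31-60 min", c + (l.countP (fun x => 31 ≤ x ∧ x ≤ 60) : Int)),
         ("61-120 min", d + (l.countP (fun x => 61 ≤ x ∧ x ≤ 120) : Int)),
         ("120+ min", e + (l.countP (fun x => 121 ≤ x) : Int))] := by
  induction l generalizing a b c d e with
  | nil => simp
  | cons x xs ih =>
    simp only [List.foldl_cons, List.countP_cons]
    by_cases h1 : x ≤ 15
    · have : (PySem.Dict.mk [("0-15 min", a), ("16-30 min", b), ("31-60 min", c),
          ("61-120 min", d), ("120+ min", e)]).modify "0-15 min" 0 (· + 1)
          = PySem.Dict.mk [("0-15 min", a + 1), ("16-30 min", b), ("31-60 min", c),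
          ("61-120 min", d), ("120+ min", e)] := by
        simp [PySem.Dict.modify, PySem.Dict.contains, PySem.Dict.get?, PySem.Dict.getD, PySem.Dict.insert]
      rw [if_pos h1, this, ih]
      simp [h1, show ¬(16 ≤ x ∧ x ≤ 30) by omega,
        show ¬(31 ≤ x ∧ x ≤ 60) by omega, show ¬(61 ≤ x ∧ x ≤ 120) by omega,
        show ¬(121 ≤ x) by omega]
      ring
    · by_cases h2 : 16 ≤ x ∧ x ≤ 30
      · have : (PySem.Dict.mk [("0-15 min", a), ("16-30 min", b), ("31-60 min", c),
            ("61-120 min", d), ("120+ min", e)]).modify "16-30 min" 0 (· + 1)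
            = PySem.Dict.mk [("0-15 min", a), ("16-30 min", b + 1), ("31-60 min", c),
            ("61-120 min", d), ("120+ min", e)] := by
          simp [PySem.Dict.modify, PySem.Dict.contains, PySem.Dict.get?, PySem.Dict.getD, PySem.Dict.insert]
        rw [if_neg h1, if_pos h2, this, ih]
        simp [h1, h2, show ¬(31 ≤ x ∧ x ≤ 60) by omega,
          show ¬(61 ≤ x ∧ x ≤ 120) by omega, show ¬(121 ≤ x) by omega]
        ring
      · by_cases h3 : 31 ≤ x ∧ x ≤ 60
        · have : (PySem.Dict.mk [("0-15 min", a), ("16-30 min", b), ("31-60 min", c),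
              ("61-120 min", d), ("120+ min", e)]).modify "31-60 min" 0 (· + 1)
              = PySem.Dict.mk [("0-15 min", a), ("16-30 min", b), ("31-60 min", c + 1),
              ("61-120 min", d), ("120+ min", e)] := by
            simp [PySem.Dict.modify, PySem.Dict.contains, PySem.Dict.get?, PySem.Dict.getD, PySem.Dict.insert]
          rw [if_neg h1, if_neg h2, if_pos h3, this, ih]
          simp [h1, h2, h3, show ¬(61 ≤ x ∧ x ≤ 120) by omega,
            show ¬(121 ≤ x) by omega]
          ring
        · by_cases h4 : 61 ≤ x ∧ x ≤ 120
          · have : (PySem.Dict.mk [("0-15 min", a), ("16-30 min", b), ("31-60 min", c),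
                ("61-120 min", d), ("120+ min", e)]).modify "61-120 min" 0 (· + 1)
                = PySem.Dict.mk [("0-15 min", a), ("16-30 min", b), ("31-60 min", c),
                ("61-120 min", d + 1), ("120+ min", e)] := by
              simp [PySem.Dict.modify, PySem.Dict.contains, PySem.Dict.get?, PySem.Dict.getD, PySem.Dict.insert]
            rw [if_neg h1, if_neg h2, if_neg h3, if_pos h4, this, ih]
            simp [h1, h2, h3, h4, show ¬(121 ≤ x) by omega]
            ring
          · have : (PySem.Dict.mk [("0-15 min", a), ("16-30 min", b), ("31-60 min", c),
                ("61-120 min", d), ("120+ min", e)]).modify "120+ min" 0 (· + 1)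
                = PySem.Dict.mk [("0-15 min", a), ("16-30 min", b), ("31-60 min", c),
                ("61-120 min", d), ("120+ min", e + 1)] := by
              simp [PySem.Dict.modify, PySem.Dict.contains, PySem.Dict.get?, PySem.Dict.getD, PySem.Dict.insert]
            rw [if_neg h1, if_neg h2, if_neg h3, if_neg h4, this, ih]
            simp [h1, h2, h3, h4, show (121 ≤ x) by omega]
            ring

-- countP over a band equals the difference of cumulative countPs
theorem pv_band_nat (lo hi : Int) (h : lo ≤ hi) (l : List Int) :
    l.countP (fun x => x ≤ hi)
      = l.countP (fun x => x ≤ lo) + l.countP (fun x => lo + 1 ≤ x ∧ x ≤ hi) := by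
  induction l with
  | nil => simp
  | cons x xs ih =>
    simp only [List.countP_cons]
    rw [ih]
    split_ifs <;> simp only [decide_eq_true_eq] at * <;> omega

theorem pv_band (l : List Int) (lo hi : Int) (h : lo ≤ hi) :
    (l.countP (fun x => lo + 1 ≤ x ∧ x ≤ hi) : Int)
      = (l.countP (fun x => x ≤ hi) : Int) - (l.countP (fun x => x ≤ lo) : Int) := by
  have := pv_band_nat lo hi h l
  omega

theorem pv_top_nat (l : List Int) :
    l.length = l.countP (fun x => x ≤ 120) + l.countP (fun x => 121 ≤ x) := by
  induction l with
  | nil => simp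
  | cons x xs ih =>
    simp only [List.countP_cons, List.length_cons]
    rw [ih]
    split_ifs <;> simp only [decide_eq_true_eq] at * <;> omega

theorem pv_top (l : List Int) :
    (l.countP (fun x => 121 ≤ x) : Int)
      = (l.length : Int) - (l.countP (fun x => x ≤ 120) : Int) := by
  have := pv_top_nat l
  omega

-- ===== VERDICT (by name: the statement is the Claim_ definition above) =====
theorem create_duration_distribution_py_spec : Claim_equal_create_duration_distribution_py := by
  intro durations _
  unfold Spec_create_duration_distribution_py create_duration_distribution_py create_duration_distribution_py_alt
  have hinit : PySem.Dict.ofList [("0-15 min", (0:Int)), ("16-30 min", 0), ("31-60 min", 0),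
      ("61-120 min", 0), ("120+ min", 0)]
      = PySem.Dict.mk [("0-15 min", 0), ("16-30 min", 0), ("31-60 min", 0),
      ("61-120 min", 0), ("120+ min", 0)] := by rfl
  rw [hinit, pv_foldl_char]
  simp only [pvCountLE]
  rw [show (16 : Int) = 15 + 1 by ring]
  rw [show (31 : Int) = 30 + 1 by ring]
  rw [show (61 : Int) = 60 + 1 by ring]
  rw [pv_band durations 15 30 (by norm_num), pv_band durations 30 60 (by norm_num),
    pv_band durations 60 120 (by norm_num), pv_top]
  norm_num
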